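-- pv_equiv track=rewrite | github.com/homeassistant-ai/ha-mcp | src/ha_mcp/tools/tools_zigbee2mqtt.py | _extract_friendly_name_from_entity_id
-- ===== SOURCE A (Python) =====
-- def _extract_friendly_name_from_entity_id(entity_id: str) -> str:
--     """
--     Extract a potential Z2M friendly name from an entity ID.
--
--     Z2M typically creates entity IDs like:
--     - sensor.living_room_motion_occupancy -> living_room_motion
--     - light.bedroom_light -> bedroom
--     - sensor.kitchen_temp_sensor_temperature -> kitchen_temp_sensor
--
--     Args:
--         entity_id: The entity ID to parse
--
--     Returns:
--         Extracted friendly name suitable for MQTT topics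
--     """
--     # Remove domain prefix
--     _, object_id = entity_id.split(".", 1)
--
--     # Common Z2M suffixes to strip
--     suffixes = [
--         "_linkquality",
--         "_battery",
--         "_contact",
--         "_occupancy",
--         "_vibration",
--         "_light",
--         "_switch",
--         "_action",
--         "_click",
--         "_power",
--         "_energy",
--         "_voltage",
--         "_current",
--         "_temperature",
--         "_humidity",
--         "_pressure",
--         "_illuminance",
--         "_illuminance_lux",
--         "_lux",
--     ]
--
--     name = object_id
--     for suffix in suffixes:
--         if name.endswith(suffix):
--             name = name[: -len(suffix)]
--             break
--
--     return name
-- ===== SOURCE B (Python) =====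
-- _Z2M_SUFFIXES = (
--     "_linkquality",
--     "_battery",
--     "_contact",
--     "_occupancy",
--     "_vibration",
--     "_light",
--     "_switch",
--     "_action",
--     "_click",
--     "_power",
--     "_energy",
--     "_voltage",
--     "_current",
--     "_temperature",
--     "_humidity",
--     "_pressure",
--     "_illuminance",
--     "_illuminance_lux",
--     "_lux",
-- )
--
--
-- def _extract_friendly_name_from_entity_id(entity_id: str) -> str:
--     """Strip the domain prefix and the longest known Z2M suffix (at most one)."""
--     _, object_id = entity_id.split(".", 1)
--     best = max((s for s in _Z2M_SUFFIXES if object_id.endswith(s)), key=len, default="")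
--     return object_id[: len(object_id) - len(best)]
-- ===== Notes on version B (the rewrite author's own statement) =====
-- stated objective: idiomatic
-- what changed: Replaced the first-match-then-break suffix loop by a declarative select: filter the suffix table for matching suffixes and strip the longest one via max(key=len, default=""); the proof shows first-listed match = longest match because no earlier suffix in the table is a suffix of a later one.
import Mathlib
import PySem

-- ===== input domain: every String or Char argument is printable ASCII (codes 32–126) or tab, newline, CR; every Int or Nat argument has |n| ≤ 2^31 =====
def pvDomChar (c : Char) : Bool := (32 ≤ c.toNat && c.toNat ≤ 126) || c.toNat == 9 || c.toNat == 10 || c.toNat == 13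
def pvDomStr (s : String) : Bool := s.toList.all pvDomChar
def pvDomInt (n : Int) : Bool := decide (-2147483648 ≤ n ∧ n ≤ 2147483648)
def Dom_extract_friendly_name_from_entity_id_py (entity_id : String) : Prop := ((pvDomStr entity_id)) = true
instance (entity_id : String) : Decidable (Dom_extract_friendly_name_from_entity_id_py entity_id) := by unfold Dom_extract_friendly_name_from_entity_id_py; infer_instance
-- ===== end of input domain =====

-- B strips the LONGEST matching Z2M suffix (filter + max) instead of A's first-listed match with
-- break; equal because no earlier suffix in the table is a suffix of a later one (objective: idiomatic).

-- ===== PORT A =====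
-- the suffix list local to A's function body
def pvSuffixesA : List (List Char) :=
  ["_linkquality".toList, "_battery".toList, "_contact".toList, "_occupancy".toList,
   "_vibration".toList, "_light".toList, "_switch".toList, "_action".toList,
   "_click".toList, "_power".toList, "_energy".toList, "_voltage".toList,
   "_current".toList, "_temperature".toList, "_humidity".toList, "_pressure".toList,
   "_illuminance".toList, "_illuminance_lux".toList, "_lux".toList]

-- A's 'for suffix in suffixes: if name.endswith(suffix): name = name[:-len(suffix)]; break'
def pvStripFirst : List (List Char) → List Char → List Char
  | [], name => name
  | s :: rest, name =>
      if PySem.Chars.endswith name s then PySem.List.slice name none (some (-(s.length : Int)))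
      else pvStripFirst rest name

def extract_friendly_name_from_entity_id_py (entity_id : String) : String :=
  match PySem.Str.splitMax? entity_id "." 1 with
  | some [_, object_id] => String.ofList (pvStripFirst pvSuffixesA object_id.toList)
  | _ => ""   -- '_, object_id = entity_id.split(".", 1)' raises ValueError here: excluded by Pre_

-- ===== PORT B =====
-- the module-level suffix tuple of Source B
def pvZ2mSuffixes : List String :=
  ["_linkquality", "_battery", "_contact", "_occupancy", "_vibration", "_light",
   "_switch", "_action", "_click", "_power", "_energy", "_voltage", "_current",
   "_temperature", "_humidity", "_pressure", "_illuminance", "_illuminance_lux", "_lux"]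

def extract_friendly_name_from_entity_id_py_alt (entity_id : String) : String :=
  -- '_, object_id = entity_id.split(".", 1)': succeeds iff the split gives exactly two pieces
  let parts := (PySem.Str.splitMax? entity_id "." 1).getD []
  if h : parts.length = 2 then
    let object_id := parts[1]
    -- max((s for s in _Z2M_SUFFIXES if object_id.endswith(s)), key=len, default="")
    let best := PySem.List.maxD (pvZ2mSuffixes.filter (fun s => PySem.Str.endswith object_id s))
                  (fun s => PySem.Str.len s) ""
    PySem.Str.slice object_id none (some (PySem.Str.len object_id - PySem.Str.len best))
  else ""   -- the unpacking raises ValueError here: excluded by Pre_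

-- ===== PRECONDITION & SPEC =====
-- Pre_ excludes entity ids without a "." : there 'entity_id.split(".", 1)' yields one piece and
-- the 2-tuple unpacking raises ValueError in A (and in B).
def Pre_extract_friendly_name_from_entity_id_py (entity_id : String) : Prop :=
  PySem.Str.isIn "." entity_id = true
instance (entity_id : String) : Decidable (Pre_extract_friendly_name_from_entity_id_py entity_id) := by unfold Pre_extract_friendly_name_from_entity_id_py; infer_instance

def pvWitness_extract_friendly_name_from_entity_id_py : String := "sensor.kitchen_temp_sensor_temperature"

def Spec_extract_friendly_name_from_entity_id_py (entity_id : String) (out : String) : Prop := out = extract_friendly_name_from_entity_id_py_alt entity_id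
instance (entity_id : String) (out : String) : Decidable (Spec_extract_friendly_name_from_entity_id_py entity_id out) := by unfold Spec_extract_friendly_name_from_entity_id_py; infer_instance

-- ===== CLAIM (what is proved, stated in full; the proofs are below) =====
def Claim_equal_extract_friendly_name_from_entity_id_py : Prop := ∀ (entity_id : String), Dom_extract_friendly_name_from_entity_id_py entity_id → Pre_extract_friendly_name_from_entity_id_py entity_id → Spec_extract_friendly_name_from_entity_id_py entity_id (extract_friendly_name_from_entity_id_py entity_id)

-- ===== LEMMAS AND PROOFS =====

-- A's loop is 'strip by the first matching suffix'
theorem pvStripFirst_eq_find (L : List (List Char)) (cs : List Char) :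
    pvStripFirst L cs =
      match L.find? (fun s => PySem.Chars.endswith cs s) with
      | some s => PySem.List.slice cs none (some (-(s.length : Int)))
      | none => cs := by
  induction L with
  | nil => rfl
  | cons s rest ih =>
      by_cases h : PySem.Chars.endswith cs s = true
      · simp [pvStripFirst, List.find?, h]
      · simp only [Bool.not_eq_true] at h
        simp [pvStripFirst, List.find?, h, ih]

-- no earlier suffix of the table is a suffix of a later one
theorem pvSuffixes_no_suffix :
    pvZ2mSuffixes.Pairwise (fun s t => ¬ (s.toList <:+ t.toList)) := by decide

theorem pvSuffixes_nonempty : ∀ s ∈ pvZ2mSuffixes, 0 < s.toList.length := by decide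

theorem pvSuffixesA_eq_map : pvSuffixesA = pvZ2mSuffixes.map String.toList := by decide

-- Python's max over a list whose head strictly dominates returns the head
theorem pvMaxD_cons_of_lt {α : Type} (key : α → Int) (s : α) (rest : List α) (d : α)
    (h : ∀ t ∈ rest, key t < key s) : PySem.List.maxD (s :: rest) key d = s := by
  have : PySem.List.max? (s :: rest) key = some s := by
    show List.foldl _ (some s) rest = some s
    induction rest with
    | nil => rfl
    | cons t ts ih =>
        have ht := h t (by simp)
        simp only [List.foldl]
        rw [if_neg (by omega)]
        exact ih (fun u hu => h u (by simp [hu]))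
  simp [PySem.List.maxD, this]

-- the matching suffixes, in table order, have strictly decreasing lengths
theorem pvFilter_decreasing (oid : String) :
    (pvZ2mSuffixes.filter (fun s => PySem.Str.endswith oid s)).Pairwise
      (fun s t => PySem.Str.len t < PySem.Str.len s) := by
  have h := (pvSuffixes_no_suffix.filter (fun s => PySem.Str.endswith oid s))
  refine h.imp_of_mem ?_
  intro s t hs ht hst
  have hps : PySem.Str.endswith oid s = true := (List.mem_filter.mp hs).2
  have hpt : PySem.Str.endswith oid t = true := (List.mem_filter.mp ht).2
  rw [PySem.Str.endswith_eq] at hps hpt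
  simp only [PySem.Str.len_eq]
  by_contra hlen
  push Not at hlen
  refine hst (List.suffix_of_suffix_length_le
    ((PySem.Chars.endswith_iff _ _).mp hps) ((PySem.Chars.endswith_iff _ _).mp hpt) ?_)
  exact_mod_cast hlen

-- core equality on the object_id piece
theorem pvCore (object_id : String) :
    String.ofList (pvStripFirst pvSuffixesA object_id.toList) =
      PySem.Str.slice object_id none
        (some (PySem.Str.len object_id -
          PySem.Str.len (PySem.List.maxD
            (pvZ2mSuffixes.filter (fun s => PySem.Str.endswith object_id s))
            (fun s => PySem.Str.len s) ""))) := by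
  have hfilt : pvSuffixesA.filter (fun s => PySem.Chars.endswith object_id.toList s)
      = (pvZ2mSuffixes.filter (fun s => PySem.Str.endswith object_id s)).map String.toList := by
    rw [pvSuffixesA_eq_map, List.filter_map]
    congr 1
  rw [pvStripFirst_eq_find, ← List.head?_filter, hfilt]
  rcases hf : pvZ2mSuffixes.filter (fun s => PySem.Str.endswith object_id s) with _ | ⟨s, rest⟩
  · simp only [List.map_nil, List.head?_nil, PySem.List.maxD, PySem.List.max?, List.foldl_nil,
      Option.getD_none]
    have h0 : PySem.Str.len "" = 0 := rfl
    rw [h0, sub_zero, PySem.Str.slice, PySem.Str.len_eq]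
    simp only [PySem.Chars.slice_eq_listSlice]
    rw [PySem.List.slice_to_natCast, List.take_length]
  · have hdec := pvFilter_decreasing object_id
    rw [hf] at hdec
    have hmax : PySem.List.maxD (s :: rest) (fun s => PySem.Str.len s) "" = s :=
      pvMaxD_cons_of_lt _ s rest "" (fun t ht => (List.pairwise_cons.mp hdec).1 t ht)
    have hsmem : s ∈ pvZ2mSuffixes.filter (fun s => PySem.Str.endswith object_id s) := by
      rw [hf]; simp
    have hps : PySem.Str.endswith object_id s = true := (List.mem_filter.mp hsmem).2
    rw [PySem.Str.endswith_eq] at hps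
    have hsuf : s.toList <:+ object_id.toList := (PySem.Chars.endswith_iff _ _).mp hps
    have hle : s.toList.length ≤ object_id.toList.length := hsuf.length_le
    have hpos : 0 < s.toList.length :=
      pvSuffixes_nonempty s (List.mem_filter.mp hsmem).1
    simp only [List.map_cons, List.head?_cons, hmax]
    rw [PySem.List.slice_to_neg_natCast _ s.toList.length hpos,
        PySem.Str.slice, PySem.Str.len_eq, PySem.Str.len_eq]
    simp only [PySem.Chars.slice_eq_listSlice]
    have : (object_id.toList.length : Int) - (s.toList.length : Int)
        = ((object_id.toList.length - s.toList.length : Nat) : Int) := by omega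
    rw [this, PySem.List.slice_to_natCast]

-- branch-by-branch equality of the two ports' scaffolding around the split result
theorem pvBranches (o : Option (List String)) :
    (match o with
      | some [_, object_id] => String.ofList (pvStripFirst pvSuffixesA object_id.toList)
      | _ => "") =
    (let parts := o.getD []
     if _ : parts.length = 2 then
       let object_id := parts[1]
       let best := PySem.List.maxD (pvZ2mSuffixes.filter (fun s => PySem.Str.endswith object_id s))
                     (fun s => PySem.Str.len s) ""
       PySem.Str.slice object_id none (some (PySem.Str.len object_id - PySem.Str.len best))
     else "") := by
  rcases o with _ | ⟨_ | ⟨x, _ | ⟨y, _ | ⟨z, l⟩⟩⟩⟩ <;>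
    simp [pvCore]

-- ===== VERDICT (by name: the statement is the Claim_ definition above) =====
theorem extract_friendly_name_from_entity_id_py_spec : Claim_equal_extract_friendly_name_from_entity_id_py := by
  intro entity_id _ _
  unfold Spec_extract_friendly_name_from_entity_id_py
  unfold extract_friendly_name_from_entity_id_py extract_friendly_name_from_entity_id_py_alt
  exact pvBranches (PySem.Str.splitMax? entity_id "." 1)
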